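-- pv_equiv track=rewrite | github.com/kimjunsung04/codetree-TILs | 250430/2개 이상의 알파벳/more-than-one-alphabet.py | check_string_word
-- ===== SOURCE A (Python) =====
-- def check_string_word(a):
--     temp_list = []
--     for item in list(a):
--         if item not in temp_list:
--             temp_list.append(item)
--         if len(temp_list) >= 2:
--             return True
--     else:
--         return False
-- ===== SOURCE B (Python) =====
-- def check_string_word(a):
--     return len(set(a)) >= 2
-- ===== Notes on version B (the rewrite author's own statement) =====
-- stated objective: idiomatic
-- what changed: Replaced the explicit scan with a two-element accumulator and early exit by building the full set of distinct characters once and comparing its size.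
import Mathlib
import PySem

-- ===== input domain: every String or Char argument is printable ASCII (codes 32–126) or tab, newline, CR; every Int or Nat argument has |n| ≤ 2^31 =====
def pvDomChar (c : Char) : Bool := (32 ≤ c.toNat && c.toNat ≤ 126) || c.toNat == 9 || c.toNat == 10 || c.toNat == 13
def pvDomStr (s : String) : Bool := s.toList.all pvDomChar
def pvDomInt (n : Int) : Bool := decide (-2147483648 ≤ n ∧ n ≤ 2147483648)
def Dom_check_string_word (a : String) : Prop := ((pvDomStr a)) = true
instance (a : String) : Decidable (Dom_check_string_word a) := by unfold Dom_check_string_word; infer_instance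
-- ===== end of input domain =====

-- B replaces A's per-character loop (accumulator of seen characters, early exit at 2)
-- by building the distinct-character set once and testing its size: len(set(a)) >= 2.

-- ===== PORT A =====
-- the for-loop over list(a) carrying temp_list; returns True inside the loop, False at its end
def chkLoopA : List Char → List Char → Bool
  | [], _ => false
  | item :: rest, temp_list =>
    let temp_list' := if item ∈ temp_list then temp_list else temp_list ++ [item]
    if 2 ≤ temp_list'.length then true else chkLoopA rest temp_list'

def check_string_word (a : String) : Bool := chkLoopA a.toList []

-- ===== PORT B =====
def check_string_word_alt (a : String) : Bool :=
  decide (2 ≤ PySem.Set.len (PySem.Set.ofList a.toList))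

-- ===== PRECONDITION & SPEC =====
def Spec_check_string_word (a : String) (out : Bool) : Prop := out = check_string_word_alt a
instance (a : String) (out : Bool) : Decidable (Spec_check_string_word a out) := by unfold Spec_check_string_word; infer_instance

-- ===== CLAIM (what is proved, stated in full; the proofs are below) =====
def Claim_equal_check_string_word : Prop := ∀ (a : String), Dom_check_string_word a → Spec_check_string_word a (check_string_word a)

-- ===== LEMMAS AND PROOFS =====

theorem setAdd_eq (temp : List Char) (c : Char) :
    PySem.Set.add temp c = if c ∈ temp then temp else temp ++ [c] := by
  simp [PySem.Set.add, PySem.Set.contains]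

theorem length_le_foldl_add (xs : List Char) (s : PySem.Set Char) :
    s.length ≤ (xs.foldl PySem.Set.add s).length := by
  induction xs generalizing s with
  | nil => simp
  | cons x xs ih =>
    refine le_trans ?_ (ih (PySem.Set.add s x))
    rw [setAdd_eq]
    split <;> simp

theorem chkLoopA_eq (xs : List Char) (temp : List Char) (h : temp.length ≤ 1) :
    chkLoopA xs temp = decide (2 ≤ (xs.foldl PySem.Set.add temp).length) := by
  induction xs generalizing temp with
  | nil => simp [chkLoopA]; omega
  | cons x xs ih =>
    have hadd : PySem.Set.add temp x = if x ∈ temp then temp else temp ++ [x] := setAdd_eq temp x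
    simp only [chkLoopA, List.foldl_cons, ← hadd]
    by_cases h2 : 2 ≤ (PySem.Set.add temp x).length
    · have := length_le_foldl_add xs (PySem.Set.add temp x)
      simp [h2]
      omega
    · rw [if_neg h2, ih _ (by omega)]; rfl

theorem check_string_word_spec : Claim_equal_check_string_word := by
  intro a _
  show check_string_word a = check_string_word_alt a
  unfold check_string_word check_string_word_alt
  rw [PySem.Set.ofList_eq_foldl, chkLoopA_eq _ _ (by simp), PySem.Set.len]
  simp
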